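-- pv_equiv track=rewrite | github.com/JactusTheCactus/concordium-wiki | sasia.py | format_base62
-- ===== SOURCE A (Python) =====
-- def to_base62(num):
--     chars = "0123456789abcdefghijklmnopqrstuvwxyzABCDEFGHIJKLMNOPQRSTUVWXYZ"
--     base62 = ""
--
--     while num > 0:
--         base62 = chars[num % 62] + base62
--         num //= 62
--     return base62
--
-- def format_base62(num):
--     base62_num = to_base62(num)
--     # Add separators every 3 characters from the end
--     formatted = []
--     count = 0
--     for char in reversed(base62_num):
--         if count and count % 3 == 0:
--             formatted.append(",")
--         formatted.append(char)
--         count += 1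
--     return "".join(reversed(formatted))
-- ===== SOURCE B (Python) =====
-- def format_base62(num):
--     chars = "0123456789abcdefghijklmnopqrstuvwxyzABCDEFGHIJKLMNOPQRSTUVWXYZ"
--     if num <= 0:
--         return ""
--     out = []
--     count = 0
--     while num > 0:
--         if count and count % 3 == 0:
--             out.append(",")
--         out.append(chars[num % 62])
--         num //= 62
--         count += 1
--     return "".join(reversed(out))
-- ===== Notes on version B (the rewrite author's own statement) =====
-- stated objective: simpler
-- what changed: B fuses A's two passes (build base62 string most-significant-first, then re-scan it backwards to insert commas) into a single divide-by-62 loop that emits digits and separators together, dropping the to_base62 helper.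
import Mathlib
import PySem

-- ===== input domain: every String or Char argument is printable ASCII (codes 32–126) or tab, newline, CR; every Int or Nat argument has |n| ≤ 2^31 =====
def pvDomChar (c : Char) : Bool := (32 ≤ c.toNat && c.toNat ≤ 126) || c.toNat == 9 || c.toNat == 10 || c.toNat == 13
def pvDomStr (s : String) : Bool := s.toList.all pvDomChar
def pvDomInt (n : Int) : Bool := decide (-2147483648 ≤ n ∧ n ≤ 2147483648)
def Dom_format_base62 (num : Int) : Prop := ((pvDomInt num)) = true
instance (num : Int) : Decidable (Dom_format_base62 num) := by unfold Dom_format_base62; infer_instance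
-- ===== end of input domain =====

-- B fuses A's two passes (build base62, then re-scan to insert commas) into one divide loop: objective = simpler.

-- ===== PORT A =====
def pvChars62 : List Char := "0123456789abcdefghijklmnopqrstuvwxyzABCDEFGHIJKLMNOPQRSTUVWXYZ".toList

-- chars[num % 62]; for num > 0 the index num % 62 is always in range, so pyGet? is always `some`
def pvDigit62 (num : Int) : Char := (PySem.List.pyGet? pvChars62 (PySem.Int.mod num 62)).getD ' '

-- A's while loop: base62 = chars[num % 62] + base62; num //= 62
def to_base62_loop (num : Int) (base62 : List Char) : List Char :=
  if h : num > 0 then to_base62_loop (PySem.Int.floordiv num 62) (pvDigit62 num :: base62)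
  else base62
  termination_by num.toNat
  decreasing_by
    have h2 : PySem.Int.floordiv num 62 = num / 62 := PySem.Int.floordiv_eq_ediv_of_pos (by omega)
    rw [h2]; omega

def to_base62 (num : Int) : List Char := to_base62_loop num []

def format_base62 (num : Int) : String :=
  let base62_num := to_base62 num
  let st := base62_num.reverse.foldl (fun (st : List Char × Int) char =>
      ((if st.2 ≠ 0 ∧ PySem.Int.mod st.2 3 = 0 then st.1 ++ [','] else st.1) ++ [char], st.2 + 1))
      ([], 0)
  String.mk st.1.reverse

-- ===== PORT B =====
-- B's single loop: emit comma (when count > 0 and count % 3 == 0) and digit together, then num //= 62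
def format_base62_alt_loop (num : Int) (count : Int) (out : List Char) : List Char :=
  if h : num > 0 then
    format_base62_alt_loop (PySem.Int.floordiv num 62) (count + 1)
      ((if count ≠ 0 ∧ PySem.Int.mod count 3 = 0 then out ++ [','] else out) ++ [pvDigit62 num])
  else out
  termination_by num.toNat
  decreasing_by
    have h2 : PySem.Int.floordiv num 62 = num / 62 := PySem.Int.floordiv_eq_ediv_of_pos (by omega)
    rw [h2]; omega

def format_base62_alt (num : Int) : String :=
  if num ≤ 0 then ""
  else String.mk (format_base62_alt_loop num 0 []).reverse

-- ===== PRECONDITION & SPEC =====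
def Spec_format_base62 (num : Int) (out : String) : Prop := out = format_base62_alt num
instance (num : Int) (out : String) : Decidable (Spec_format_base62 num out) := by unfold Spec_format_base62; infer_instance

-- ===== CLAIM (what is proved, stated in full; the proofs are below) =====
def Claim_equal_format_base62 : Prop := ∀ (num : Int), Dom_format_base62 num → Spec_format_base62 num (format_base62 num)

-- ===== LEMMAS AND PROOFS =====

-- the base-62 digits of num, least significant first
def pvLsf (num : Int) : List Char :=
  if h : num > 0 then pvDigit62 num :: pvLsf (PySem.Int.floordiv num 62)
  else []
  termination_by num.toNat
  decreasing_by
    have h2 : PySem.Int.floordiv num 62 = num / 62 := PySem.Int.floordiv_eq_ediv_of_pos (by omega)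
    rw [h2]; omega

-- the shared per-digit step (A's fold body = B's loop body)
def pvStep (st : List Char × Int) (char : Char) : List Char × Int :=
  ((if st.2 ≠ 0 ∧ PySem.Int.mod st.2 3 = 0 then st.1 ++ [','] else st.1) ++ [char], st.2 + 1)

theorem to_base62_loop_eq (num : Int) (acc : List Char) :
    to_base62_loop num acc = (pvLsf num).reverse ++ acc := by
  fun_induction to_base62_loop num acc with
  | case1 num acc h ih => rw [pvLsf, dif_pos h, ih]; simp
  | case2 num acc h => rw [pvLsf, dif_neg h]; simp

theorem alt_loop_eq (num : Int) (count : Int) (out : List Char) :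
    format_base62_alt_loop num count out = ((pvLsf num).foldl pvStep (out, count)).1 := by
  fun_induction format_base62_alt_loop num count out with
  | case1 num count out h ih => rw [pvLsf, dif_pos h]; simpa [pvStep] using ih
  | case2 num count out h => rw [pvLsf, dif_neg h]; simp

-- ===== VERDICT (by name: the statement is the Claim_ definition above) =====
theorem format_base62_spec : Claim_equal_format_base62 := by
  intro num _
  unfold Spec_format_base62 format_base62 format_base62_alt to_base62
  rw [to_base62_loop_eq]
  by_cases h : num ≤ 0
  · rw [if_pos h, pvLsf, dif_neg (by omega)]
    simp
    rfl
  · rw [if_neg h, alt_loop_eq]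
    have hs : (fun (st : List Char × Int) char =>
        ((if st.2 ≠ 0 ∧ PySem.Int.mod st.2 3 = 0 then st.1 ++ [','] else st.1) ++ [char], st.2 + 1)) = pvStep := by
      funext st char; rfl
    rw [hs]
    simp
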